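-- pv_equiv track=rewrite | github.com/SudaisX/pfun | assignment5/q4.py | minX
-- ===== SOURCE A (Python) =====
-- def minX(arr):
--     rolling_sum, x = 0, 0
--     for n in arr:
--         rolling_sum += n
--         if rolling_sum < 1:
--             x += (1-rolling_sum)
--             rolling_sum = 1
--     return x
-- ===== SOURCE B (Python) =====
-- def minX(arr):
--     # Stage 1: materialize all running prefix sums (no clamping).
--     ps = []
--     s = 0
--     for n in arr:
--         s += n
--         ps.append(s)
--     # Stage 2: the answer is the deficit of the lowest prefix sum below 1.
--     low = min(ps, default=1)
--     return 1 - low if low < 1 else 0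
-- ===== Notes on version B (the rewrite author's own statement) =====
-- stated objective: alternative
-- what changed: B replaces A's clamp-and-accumulate single loop with two stages: it first materializes the list of raw prefix sums, then takes their minimum and returns the closed-form deficit max(0, 1 - min).
import Mathlib
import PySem

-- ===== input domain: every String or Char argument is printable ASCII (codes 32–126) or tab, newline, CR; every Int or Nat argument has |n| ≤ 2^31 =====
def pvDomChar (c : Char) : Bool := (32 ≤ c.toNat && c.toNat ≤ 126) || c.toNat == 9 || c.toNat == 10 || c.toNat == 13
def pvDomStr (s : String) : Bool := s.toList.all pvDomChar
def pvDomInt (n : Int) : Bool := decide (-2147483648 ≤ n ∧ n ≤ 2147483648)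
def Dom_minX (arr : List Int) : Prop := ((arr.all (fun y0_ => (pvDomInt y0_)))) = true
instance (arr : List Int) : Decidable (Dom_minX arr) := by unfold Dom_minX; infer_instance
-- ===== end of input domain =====

-- B replaces A's clamp-and-accumulate loop with two stages: build the raw prefix-sum list, then return the deficit 1 - min(ps, default=1) clamped at 0 (objective: alternative).


-- ===== PORT A =====
-- for n in arr: rolling_sum += n; if rolling_sum < 1: x += (1-rolling_sum); rolling_sum = 1
def minX (arr : List Int) : Int :=
  (arr.foldl (fun (p : Int × Int) n =>
    let r := p.1 + n
    if r < 1 then (1, p.2 + (1 - r)) else (r, p.2)) (0, 0)).2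

-- ===== PORT B =====
-- Stage 1: the list of raw running prefix sums (s starts at 0, append s+n each step).
def prefixList : List Int → Int → List Int
  | [], _ => []
  | n :: t, s => (s + n) :: prefixList t (s + n)

-- Stage 2: low = min(ps, default=1) (min over Int is the minimum value); return the deficit.
def minX_alt (arr : List Int) : Int :=
  let ps := prefixList arr 0
  let low := match ps with
    | [] => 1
    | h :: t => t.foldl min h
  if low < 1 then 1 - low else 0

-- ===== PRECONDITION & SPEC =====
def Spec_minX (arr : List Int) (out : Int) : Prop := out = minX_alt arr
instance (arr : List Int) (out : Int) : Decidable (Spec_minX arr out) := by unfold Spec_minX; infer_instance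

-- ===== CLAIM (what is proved, stated in full; the proofs are below) =====
def Claim_equal_minX : Prop := ∀ (arr : List Int), Dom_minX arr → Spec_minX arr (minX arr)

-- ===== LEMMAS AND PROOFS =====
-- foldl min pulls the accumulator's min outward
theorem foldl_min_min (t : List Int) : ∀ (a b : Int),
    t.foldl min (min a b) = min a (t.foldl min b) := by
  induction t with
  | nil => intro a b; rfl
  | cons h t ih =>
    intro a b
    simp only [List.foldl_cons, min_assoc]
    exact ih a (min b h)

-- A's loop from state (r, x), compared with the min of 1 and all prefix sums from s,
-- under the invariant x = 1 - m and r = s + x (m = min of 1 and prefixes seen so far).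
theorem minX_inv (arr : List Int) : ∀ (r x s m : Int), x = 1 - m → r = s + x →
    (arr.foldl (fun (p : Int × Int) n =>
      let r := p.1 + n
      if r < 1 then (1, p.2 + (1 - r)) else (r, p.2)) (r, x)).2
    = 1 - (prefixList arr s).foldl min m := by
  induction arr with
  | nil => intro r x s m hx hr; simp [prefixList, hx]
  | cons n t ih =>
    intro r x s m hx hr
    simp only [List.foldl_cons, prefixList]
    by_cases h : r + n < 1
    · simp only [h, if_pos]
      have hmin : min m (s + n) = s + n := by omega
      rw [hmin]
      exact ih 1 (x + (1 - (r + n))) (s + n) (s + n) (by omega) (by omega)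
    · simp only [h, if_neg, not_false_iff]
      have hmin : min m (s + n) = m := by omega
      rw [hmin]
      exact ih (r + n) x (s + n) m (by omega) (by omega)

-- ===== VERDICT (by name: the statement is the Claim_ definition above) =====
theorem minX_spec : Claim_equal_minX := by
  intro arr _
  unfold Spec_minX minX minX_alt
  rw [minX_inv arr 0 0 0 1 (by omega) (by omega)]
  cases hps : prefixList arr 0 with
  | nil => simp
  | cons h t =>
    simp only [List.foldl_cons]
    have h1 : t.foldl min (min 1 h) = min 1 (t.foldl min h) := foldl_min_min t 1 h
    rw [show min 1 h = min 1 h from rfl] at h1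
    rw [h1]
    have := min_le_left (1 : Int) (t.foldl min h)
    have := min_le_right (1 : Int) (t.foldl min h)
    by_cases hl : t.foldl min h < 1
    · simp only [hl, if_pos]; omega
    · simp only [hl, if_neg, not_false_iff]; omega
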